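-- pv_equiv track=rewrite | github.com/oustella/wccg_drexeldsc | 3_burningTheWood_PNKR.py | burningTheWood
-- ===== SOURCE A (Python) =====
-- def burningTheWood(n, wmap, start, k):
--     op = [start]
--     while k > 0:
--         start = set(op)
--         for i in wmap:
--             if i[0] in start or i[1] in start:
--                 op.extend(i)
--         k -= 1
--     return sorted(list(set(op)))
-- ===== SOURCE B (Python) =====
-- def burningTheWood(n, wmap, start, k):
--     adj = {}
--     for e in wmap:
--         for v in e[:2]:
--             adj.setdefault(v, []).append(e)
--     reached = {start}
--     frontier = [start]
--     while k > 0 and frontier: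
--         new = []
--         for v in frontier:
--             for e in adj.get(v, []):
--                 for x in e:
--                     if x not in reached:
--                         reached.add(x)
--                         new.append(x)
--         frontier = new
--         k -= 1
--     return sorted(reached)
-- ===== Notes on version B (the rewrite author's own statement) =====
-- stated objective: faster
-- what changed: Replaced the k-fold rescans of the whole edge list (rebuilding set(op) each round) by an adjacency dict built once plus a frontier-based BFS that expands at most k levels and stops early when the frontier is empty.
import Mathlib
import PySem

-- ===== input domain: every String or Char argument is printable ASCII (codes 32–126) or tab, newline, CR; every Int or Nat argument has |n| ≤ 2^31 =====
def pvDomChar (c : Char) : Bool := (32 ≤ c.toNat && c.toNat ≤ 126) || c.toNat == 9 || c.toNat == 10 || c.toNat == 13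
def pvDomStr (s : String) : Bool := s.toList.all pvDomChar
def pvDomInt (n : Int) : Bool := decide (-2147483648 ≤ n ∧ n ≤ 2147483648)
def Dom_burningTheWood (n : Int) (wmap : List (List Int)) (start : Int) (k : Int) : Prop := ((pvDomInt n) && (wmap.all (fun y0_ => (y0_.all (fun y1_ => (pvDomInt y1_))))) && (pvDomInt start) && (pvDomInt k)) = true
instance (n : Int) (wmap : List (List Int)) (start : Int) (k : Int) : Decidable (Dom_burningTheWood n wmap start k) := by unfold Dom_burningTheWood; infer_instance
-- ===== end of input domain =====

-- B replaces A's k full rescans of the edge list by a one-time adjacency dict plus a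
-- frontier BFS capped at k levels with an early stop; proved to return the same sorted list.

-- ===== PORT A =====
-- one pass of A's inner `for i in wmap` loop against the snapshot set(op)
def bw_round (wmap : List (List Int)) (op : List Int) : List Int :=
  let st : PySem.Set Int := PySem.Set.ofList op
  wmap.foldl (fun acc i =>
    match PySem.List.pyGet? i 0 with
    | none => acc  -- Python raises IndexError here; excluded by Pre_
    | some a =>
      if PySem.Set.contains st a then acc ++ i
      else
        match PySem.List.pyGet? i 1 with
        | none => acc  -- Python raises IndexError here; excluded by Pre_
        | some b => if PySem.Set.contains st b then acc ++ i else acc) op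

-- A's `while k > 0` loop, k.toNat rounds
def bw_loop (wmap : List (List Int)) : Nat → List Int → List Int
  | 0, op => op
  | t + 1, op => bw_loop wmap t (bw_round wmap op)

def burningTheWood (n : Int) (wmap : List (List Int)) (start : Int) (k : Int) : List Int :=
  PySem.List.sorted (PySem.Set.ofList (bw_loop wmap k.toNat [start])) (fun x => x) false

-- ===== PORT B =====
-- adjacency dict: for e in wmap: for v in e[:2]: adj.setdefault(v, []).append(e)
def bwAlt_adj (wmap : List (List Int)) : PySem.Dict Int (List (List Int)) :=
  wmap.foldl (fun d e =>
    (PySem.List.slice e none (some 2)).foldl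
      (fun d v => d.insert v (d.getD v [] ++ [e])) d) PySem.Dict.empty

-- one BFS level: state is (reached, new)
def bwAlt_step (adj : PySem.Dict Int (List (List Int)))
    (reached : PySem.Set Int) (frontier : List Int) : PySem.Set Int × List Int :=
  frontier.foldl (fun st v =>
    (adj.getD v []).foldl (fun st e =>
      e.foldl (fun st x =>
        if PySem.Set.contains st.1 x then st
        else (PySem.Set.add st.1 x, st.2 ++ [x])) st) st) (reached, [])

-- `while k > 0 and frontier:` loop
def bwAlt_loop (adj : PySem.Dict Int (List (List Int))) :
    Nat → PySem.Set Int → List Int → PySem.Set Int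
  | 0, r, _ => r
  | t + 1, r, fr =>
    if fr = [] then r
    else
      let p := bwAlt_step adj r fr
      bwAlt_loop adj t p.1 p.2

def burningTheWood_alt (n : Int) (wmap : List (List Int)) (start : Int) (k : Int) : List Int :=
  let adj := bwAlt_adj wmap
  PySem.List.sorted (bwAlt_loop adj k.toNat (PySem.Set.ofList [start]) [start]) (fun x => x) false

-- ===== PRECONDITION & SPEC =====
-- Pre_ holds exactly where Python A returns: when k > 0, every edge must have ≥ 2 entries,
-- except the one-entry edge [start], on which A's short-circuit `or` never reads i[1].
def Pre_burningTheWood (n : Int) (wmap : List (List Int)) (start : Int) (k : Int) : Prop :=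
  k ≤ 0 ∨ ∀ e ∈ wmap, 2 ≤ e.length ∨ e = [start]
instance (n : Int) (wmap : List (List Int)) (start : Int) (k : Int) : Decidable (Pre_burningTheWood n wmap start k) := by unfold Pre_burningTheWood; infer_instance

def pvWitness_burningTheWood : Int × List (List Int) × Int × Int := (4, [[0, 1], [1, 2], [3, 3]], 0, 2)


def Spec_burningTheWood (n : Int) (wmap : List (List Int)) (start : Int) (k : Int) (out : List Int) : Prop := out = burningTheWood_alt n wmap start k
instance (n : Int) (wmap : List (List Int)) (start : Int) (k : Int) (out : List Int) : Decidable (Spec_burningTheWood n wmap start k out) := by unfold Spec_burningTheWood; infer_instance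

-- ===== CLAIM (what is proved, stated in full; the proofs are below) =====
def Claim_equal_burningTheWood : Prop := ∀ (n : Int) (wmap : List (List Int)) (start : Int) (k : Int), Dom_burningTheWood n wmap start k → Pre_burningTheWood n wmap start k → Spec_burningTheWood n wmap start k (burningTheWood n wmap start k)

-- ===== LEMMAS AND PROOFS =====

-- the trigger condition shared by both programs: some of the first two entries of e is in S
abbrev bwTrig (S : List Int) (e : List Int) : Prop := ∃ v ∈ e.take 2, v ∈ S

theorem bw_nodup_add (s : PySem.Set Int) (x : Int) (h : List.Nodup s) : List.Nodup (s.add x) := by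
  unfold PySem.Set.add
  split
  · exact h
  · rename_i hc
    simp [List.nodup_append, h]
    intro y hy he
    subst he
    exact hc ((PySem.Set.contains_iff s y).mpr hy)

-- membership through one round of A's edge scan
theorem bw_round_aux (op : List Int) (s0 : Int) (hs : s0 ∈ op) :
    ∀ (wm : List (List Int)) (acc : List Int),
      (∀ e ∈ wm, 2 ≤ e.length ∨ e = [s0]) →
      ∀ x, (x ∈ wm.foldl (fun acc i =>
        match PySem.List.pyGet? i 0 with
        | none => acc
        | some a =>
          if PySem.Set.contains (PySem.Set.ofList op) a then acc ++ i
          else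
            match PySem.List.pyGet? i 1 with
            | none => acc
            | some b => if PySem.Set.contains (PySem.Set.ofList op) b then acc ++ i else acc) acc
        ↔ x ∈ acc ∨ ∃ e ∈ wm, bwTrig op e ∧ x ∈ e) := by
  intro wm
  induction wm with
  | nil => intro acc _ x; simp
  | cons e rest ih =>
    intro acc hpre x
    have hstep : (match PySem.List.pyGet? e 0 with
        | none => acc
        | some a =>
          if PySem.Set.contains (PySem.Set.ofList op) a then acc ++ e
          else
            match PySem.List.pyGet? e 1 with
            | none => acc
            | some b => if PySem.Set.contains (PySem.Set.ofList op) b then acc ++ e else acc)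
        = if bwTrig op e then acc ++ e else acc := by
      rcases hpre e (by simp) with hlen | hsingle
      · match e, hlen with
        | a :: b :: r, _ =>
          have h0 : PySem.List.pyGet? (a::b::r) 0 = some a := by
            simpa using PySem.List.pyGet?_natCast (a::b::r) 0
          have h1 : PySem.List.pyGet? (a::b::r) 1 = some b := by
            simpa using PySem.List.pyGet?_natCast (a::b::r) 1
          rw [h0, h1]
          dsimp only
          have htr : bwTrig op (a::b::r) ↔ a ∈ op ∨ b ∈ op := by
            simp [bwTrig, List.take]
          by_cases ha : a ∈ op
          · rw [if_pos ((PySem.Set.contains_iff _ _).mpr ((PySem.Set.mem_ofList op a).mpr ha)),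
              if_pos (htr.mpr (Or.inl ha))]
          · rw [if_neg (fun hc => ha ((PySem.Set.mem_ofList op a).mp ((PySem.Set.contains_iff _ _).mp hc)))]
            by_cases hb : b ∈ op
            · rw [if_pos ((PySem.Set.contains_iff _ _).mpr ((PySem.Set.mem_ofList op b).mpr hb)),
                if_pos (htr.mpr (Or.inr hb))]
            · rw [if_neg (fun hc => hb ((PySem.Set.mem_ofList op b).mp ((PySem.Set.contains_iff _ _).mp hc))),
                if_neg]
              rw [htr]; tauto
      · subst hsingle
        have h0 : PySem.List.pyGet? [s0] 0 = some s0 := by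
          simpa using PySem.List.pyGet?_natCast [s0] 0
        rw [h0]
        dsimp only
        rw [
          if_pos ((PySem.Set.contains_iff _ _).mpr ((PySem.Set.mem_ofList op s0).mpr hs)),
          if_pos (by exact ⟨s0, by simp, hs⟩)]
    simp only [List.foldl_cons, hstep]
    rw [ih _ (fun e' he' => hpre e' (by simp [he']))]
    by_cases ht : bwTrig op e
    · rw [if_pos ht]
      constructor
      · rintro (h | ⟨e', he', ht', hx⟩)
        · rcases List.mem_append.mp h with h | h
          · exact Or.inl h
          · exact Or.inr ⟨e, by simp, ht, h⟩
        · exact Or.inr ⟨e', by simp [he'], ht', hx⟩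
      · rintro (h | ⟨e', he', ht', hx⟩)
        · exact Or.inl (List.mem_append.mpr (Or.inl h))
        · rcases List.mem_cons.mp he' with rfl | he''
          · exact Or.inl (List.mem_append.mpr (Or.inr hx))
          · exact Or.inr ⟨e', he'', ht', hx⟩
    · rw [if_neg ht]
      constructor
      · rintro (h | ⟨e', he', ht', hx⟩)
        · exact Or.inl h
        · exact Or.inr ⟨e', by simp [he'], ht', hx⟩
      · rintro (h | ⟨e', he', ht', hx⟩)
        · exact Or.inl h
        · rcases List.mem_cons.mp he' with rfl | he''
          · exact absurd ht' ht
          · exact Or.inr ⟨e', he'', ht', hx⟩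

theorem bw_round_mem (wm : List (List Int)) (op : List Int) (s0 : Int)
    (hpre : ∀ e ∈ wm, 2 ≤ e.length ∨ e = [s0]) (hs : s0 ∈ op) (x : Int) :
    x ∈ bw_round wm op ↔ x ∈ op ∨ ∃ e ∈ wm, bwTrig op e ∧ x ∈ e := by
  unfold bw_round
  exact bw_round_aux op s0 hs wm op hpre x

-- adjacency-dict characterisation
theorem bw_adj_inner (e : List Int) :
    ∀ (vs : List Int) (d : PySem.Dict Int (List (List Int))) (w : Int) (y : List Int),
      y ∈ (vs.foldl (fun d v => d.insert v (d.getD v [] ++ [e])) d).getD w []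
        ↔ y ∈ d.getD w [] ∨ (y = e ∧ w ∈ vs) := by
  intro vs
  induction vs with
  | nil => intro d w y; simp
  | cons v rest ih =>
    intro d w y
    simp only [List.foldl_cons]
    rw [ih]
    rw [PySem.Dict.getD_insert]
    by_cases hw : w = v
    · subst hw; simp; tauto
    · rw [if_neg hw]; simp [hw]

theorem bw_adj_mem (wm : List (List Int)) (w : Int) (y : List Int) :
    y ∈ (bwAlt_adj wm).getD w [] ↔ y ∈ wm ∧ w ∈ y.take 2 := by
  unfold bwAlt_adj
  suffices h : ∀ (d : PySem.Dict Int (List (List Int))),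
      y ∈ (wm.foldl (fun d e => (PySem.List.slice e none (some 2)).foldl
        (fun d v => d.insert v (d.getD v [] ++ [e])) d) d).getD w []
      ↔ y ∈ d.getD w [] ∨ (y ∈ wm ∧ w ∈ y.take 2) by
    rw [h PySem.Dict.empty]
    simp [PySem.Dict.getD, PySem.Dict.get?, PySem.Dict.empty]
  induction wm with
  | nil => intro d; simp
  | cons e rest ih =>
    intro d
    simp only [List.foldl_cons]
    rw [ih]
    have hsl : PySem.List.slice e none (some 2) = e.take 2 := by
      rw [PySem.List.slice_to e (by norm_num)]; congr 1
    rw [hsl, bw_adj_inner]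
    constructor
    · rintro (⟨h | ⟨rfl, hw⟩⟩ | h)
      · tauto
      · simp [hw]
      · simp at h ⊢; tauto
    · rintro (h | ⟨hy, hw⟩)
      · tauto
      · rcases List.mem_cons.mp hy with rfl | hy2
        · tauto
        · right; exact ⟨by simp [hy2], hw⟩

-- the (reached, new) invariant through B's step
def bwJ (r0 : List Int) (st : PySem.Set Int × List Int) : Prop :=
  (∀ x, x ∈ st.1 ↔ x ∈ r0 ∨ x ∈ st.2) ∧ (∀ x ∈ st.2, x ∉ r0)

theorem bw_absorb_inner (r0 : List Int) :
    ∀ (e : List Int) (st : PySem.Set Int × List Int), bwJ r0 st → List.Nodup st.1 →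
      bwJ r0 (e.foldl (fun st x =>
          if PySem.Set.contains st.1 x then st
          else (PySem.Set.add st.1 x, st.2 ++ [x])) st)
      ∧ List.Nodup (e.foldl (fun st x =>
          if PySem.Set.contains st.1 x then st
          else (PySem.Set.add st.1 x, st.2 ++ [x])) st).1
      ∧ (∀ x, x ∈ (e.foldl (fun st x =>
          if PySem.Set.contains st.1 x then st
          else (PySem.Set.add st.1 x, st.2 ++ [x])) st).1 ↔ x ∈ st.1 ∨ x ∈ e) := by
  intro e
  induction e with
  | nil => intro st hJ hnd; exact ⟨hJ, hnd, by simp⟩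
  | cons a r ih =>
    intro st hJ hnd
    simp only [List.foldl_cons]
    by_cases hc : PySem.Set.contains st.1 a = true
    · rw [if_pos hc]
      have ha : a ∈ st.1 := (PySem.Set.contains_iff _ _).mp hc
      obtain ⟨hJ', hnd', hm⟩ := ih st hJ hnd
      refine ⟨hJ', hnd', fun x => ?_⟩
      rw [hm]
      constructor
      · rintro (h | h)
        · exact Or.inl h
        · exact Or.inr (List.mem_cons_of_mem _ h)
      · rintro (h | h)
        · exact Or.inl h
        · rcases List.mem_cons.mp h with rfl | h2
          · exact Or.inl ha
          · exact Or.inr h2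
    · rw [if_neg hc]
      have ha : a ∉ st.1 := fun h => hc ((PySem.Set.contains_iff _ _).mpr h)
      have hJ2 : bwJ r0 (PySem.Set.add st.1 a, st.2 ++ [a]) := by
        constructor
        · intro x
          rw [PySem.Set.mem_add]
          simp only [List.mem_append, List.mem_singleton]
          rw [hJ.1 x]; tauto
        · intro x hx
          simp only [List.mem_append, List.mem_singleton] at hx
          rcases hx with hx | rfl
          · exact hJ.2 x hx
          · intro hx0
            exact ha ((hJ.1 x).mpr (Or.inl hx0))
      obtain ⟨hJ', hnd', hm⟩ := ih _ hJ2 (bw_nodup_add st.1 a hnd)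
      refine ⟨hJ', hnd', fun x => ?_⟩
      rw [hm]
      simp only [PySem.Set.mem_add, List.mem_cons]
      tauto

theorem bw_absorb_edges (r0 : List Int) :
    ∀ (es : List (List Int)) (st : PySem.Set Int × List Int), bwJ r0 st → List.Nodup st.1 →
      bwJ r0 (es.foldl (fun st e => e.foldl (fun st x =>
          if PySem.Set.contains st.1 x then st
          else (PySem.Set.add st.1 x, st.2 ++ [x])) st) st)
      ∧ List.Nodup (es.foldl (fun st e => e.foldl (fun st x =>
          if PySem.Set.contains st.1 x then st
          else (PySem.Set.add st.1 x, st.2 ++ [x])) st) st).1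
      ∧ (∀ x, x ∈ (es.foldl (fun st e => e.foldl (fun st x =>
          if PySem.Set.contains st.1 x then st
          else (PySem.Set.add st.1 x, st.2 ++ [x])) st) st).1
          ↔ x ∈ st.1 ∨ ∃ e ∈ es, x ∈ e) := by
  intro es
  induction es with
  | nil => intro st hJ hnd; exact ⟨hJ, hnd, by simp⟩
  | cons e rest ih =>
    intro st hJ hnd
    simp only [List.foldl_cons]
    obtain ⟨hJ1, hnd1, hm1⟩ := bw_absorb_inner r0 e st hJ hnd
    obtain ⟨hJ2, hnd2, hm2⟩ := ih _ hJ1 hnd1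
    refine ⟨hJ2, hnd2, fun x => ?_⟩
    rw [hm2, hm1]
    constructor
    · rintro ((h | h) | ⟨e', he', hx⟩)
      · exact Or.inl h
      · exact Or.inr ⟨e, by simp, h⟩
      · exact Or.inr ⟨e', by simp [he'], hx⟩
    · rintro (h | ⟨e', he', hx⟩)
      · exact Or.inl (Or.inl h)
      · rcases List.mem_cons.mp he' with rfl | h2
        · exact Or.inl (Or.inr hx)
        · exact Or.inr ⟨e', h2, hx⟩

theorem bw_step_spec (adj : PySem.Dict Int (List (List Int))) (r : PySem.Set Int)
    (fr : List Int) (hnd : List.Nodup r) :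
    bwJ r (bwAlt_step adj r fr)
    ∧ List.Nodup (bwAlt_step adj r fr).1
    ∧ (∀ x, x ∈ (bwAlt_step adj r fr).1
        ↔ x ∈ r ∨ ∃ v ∈ fr, ∃ e ∈ adj.getD v [], x ∈ e) := by
  unfold bwAlt_step
  suffices h : ∀ (fr : List Int) (st : PySem.Set Int × List Int), bwJ r st → List.Nodup st.1 →
      bwJ r (fr.foldl (fun st v => (adj.getD v []).foldl (fun st e => e.foldl (fun st x =>
          if PySem.Set.contains st.1 x then st
          else (PySem.Set.add st.1 x, st.2 ++ [x])) st) st) st)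
      ∧ List.Nodup (fr.foldl (fun st v => (adj.getD v []).foldl (fun st e => e.foldl (fun st x =>
          if PySem.Set.contains st.1 x then st
          else (PySem.Set.add st.1 x, st.2 ++ [x])) st) st) st).1
      ∧ (∀ x, x ∈ (fr.foldl (fun st v => (adj.getD v []).foldl (fun st e => e.foldl (fun st x =>
          if PySem.Set.contains st.1 x then st
          else (PySem.Set.add st.1 x, st.2 ++ [x])) st) st) st).1
          ↔ x ∈ st.1 ∨ ∃ v ∈ fr, ∃ e ∈ adj.getD v [], x ∈ e) by
    obtain ⟨hJ, hnd', hm⟩ := h fr (r, []) ⟨by simp, by simp⟩ hnd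
    exact ⟨hJ, hnd', hm⟩
  intro fr
  induction fr with
  | nil => intro st hJ hnd'; exact ⟨hJ, hnd', by simp⟩
  | cons v rest ih =>
    intro st hJ hnd'
    simp only [List.foldl_cons]
    obtain ⟨hJ1, hnd1, hm1⟩ := bw_absorb_edges r (adj.getD v []) st hJ hnd'
    obtain ⟨hJ2, hnd2, hm2⟩ := ih _ hJ1 hnd1
    refine ⟨hJ2, hnd2, fun x => ?_⟩
    rw [hm2, hm1]
    constructor
    · rintro ((h | ⟨e, he, hx⟩) | ⟨v', hv', e, he, hx⟩)
      · exact Or.inl h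
      · exact Or.inr ⟨v, by simp, e, he, hx⟩
      · exact Or.inr ⟨v', by simp [hv'], e, he, hx⟩
    · rintro (h | ⟨v', hv', e, he, hx⟩)
      · exact Or.inl (Or.inl h)
      · rcases List.mem_cons.mp hv' with rfl | h2
        · exact Or.inl (Or.inr ⟨e, he, hx⟩)
        · exact Or.inr ⟨v', h2, e, he, hx⟩

theorem bwAlt_loop_nil (adj : PySem.Dict Int (List (List Int))) (fuel : Nat)
    (r : PySem.Set Int) : bwAlt_loop adj fuel r [] = r := by
  cases fuel <;> simp [bwAlt_loop]

-- the coupled main induction: A's k rounds and B's capped BFS reach the same set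
theorem bw_main (wm : List (List Int)) (s0 : Int)
    (hpre : ∀ e ∈ wm, 2 ≤ e.length ∨ e = [s0]) :
    ∀ (fuel : Nat) (op : List Int) (r : PySem.Set Int) (fr : List Int),
      (∀ x, x ∈ op ↔ x ∈ r) → s0 ∈ op → (∀ x ∈ fr, x ∈ r) →
      (∀ e ∈ wm, (∃ v ∈ e.take 2, v ∈ r ∧ v ∉ fr) → ∀ x ∈ e, x ∈ r) →
      List.Nodup r →
      (∀ x, x ∈ bw_loop wm fuel op ↔ x ∈ bwAlt_loop (bwAlt_adj wm) fuel r fr)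
      ∧ List.Nodup (bwAlt_loop (bwAlt_adj wm) fuel r fr) := by
  intro fuel
  induction fuel with
  | zero => intro op r fr hmem _ _ _ hnd; exact ⟨by simpa [bw_loop, bwAlt_loop] using hmem, by simpa [bwAlt_loop] using hnd⟩
  | succ t ih =>
    intro op r fr hmem hs hfr habs hnd
    have hround := fun x => bw_round_mem wm op s0 hpre hs x
    have hmono : ∀ x ∈ op, x ∈ bw_round wm op := fun x hx => (hround x).mpr (Or.inl hx)
    by_cases hfre : fr = []
    · subst hfre
      -- B stops; A's round adds nothing new
      have hsame : ∀ x, x ∈ bw_round wm op ↔ x ∈ r := by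
        intro x
        rw [hround x]
        constructor
        · rintro (h | ⟨e, he, ⟨v, hv2, hvr⟩, hx⟩)
          · exact (hmem x).mp h
          · exact habs e he ⟨v, hv2, (hmem v).mp hvr, by simp⟩ x hx
        · intro h
          exact Or.inl ((hmem x).mpr h)
      have := ih (bw_round wm op) r [] (by
          intro x; exact hsame x)
        (hmono s0 hs) (by simp)
        (by intro e he ⟨v, hv2, hvr, _⟩; exact habs e he ⟨v, hv2, hvr, by simp⟩) hnd
      rw [bwAlt_loop_nil] at this
      show (∀ x, x ∈ bw_loop wm t (bw_round wm op) ↔ x ∈ bwAlt_loop (bwAlt_adj wm) (t+1) r []) ∧ _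
      rw [show bwAlt_loop (bwAlt_adj wm) (t+1) r [] = r from by simp [bwAlt_loop]]
      exact this
    · -- both step
      have hstep := bw_step_spec (bwAlt_adj wm) r fr hnd
      set p := bwAlt_step (bwAlt_adj wm) r fr with hp
      obtain ⟨⟨hJ1, hJ2⟩, hndp, hmp⟩ := hstep
      -- rewrite B-step membership through the adjacency characterisation
      have hmp' : ∀ x, x ∈ p.1 ↔ x ∈ r ∨ ∃ e ∈ wm, bwTrig fr e ∧ x ∈ e := by
        intro x
        rw [hmp x]
        constructor
        · rintro (h | ⟨v, hv, e, he, hx⟩)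
          · tauto
          · rw [bw_adj_mem] at he
            exact Or.inr ⟨e, he.1, ⟨v, he.2, hv⟩, hx⟩
        · rintro (h | ⟨e, he, ⟨v, hv2, hvf⟩, hx⟩)
          · tauto
          · exact Or.inr ⟨v, hvf, e, (bw_adj_mem wm v e).mpr ⟨he, hv2⟩, hx⟩
      -- the two new states agree
      have hmem' : ∀ x, x ∈ bw_round wm op ↔ x ∈ p.1 := by
        intro x
        rw [hround x, hmp' x]
        constructor
        · rintro (h | ⟨e, he, ⟨v, hv2, hvo⟩, hx⟩)
          · exact Or.inl ((hmem x).mp h)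
          · by_cases hvf : v ∈ fr
            · exact Or.inr ⟨e, he, ⟨v, hv2, hvf⟩, hx⟩
            · exact Or.inl (habs e he ⟨v, hv2, (hmem v).mp hvo, hvf⟩ x hx)
        · rintro (h | ⟨e, he, ⟨v, hv2, hvf⟩, hx⟩)
          · exact Or.inl ((hmem x).mpr h)
          · exact Or.inr ⟨e, he, ⟨v, hv2, (hmem v).mpr (hfr v hvf)⟩, hx⟩
      have hs' : s0 ∈ bw_round wm op := hmono s0 hs
      have hfr' : ∀ x ∈ p.2, x ∈ p.1 := by
        intro x hx; exact (hJ1 x).mpr (Or.inr hx)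
      have habs' : ∀ e ∈ wm, (∃ v ∈ e.take 2, v ∈ p.1 ∧ v ∉ p.2) → ∀ x ∈ e, x ∈ p.1 := by
        rintro e he ⟨v, hv2, hvp, hvn⟩ x hx
        have hvr : v ∈ r := by
          rcases (hJ1 v).mp hvp with h | h
          · exact h
          · exact absurd h hvn
        by_cases hvf : v ∈ fr
        · exact (hmp' x).mpr (Or.inr ⟨e, he, ⟨v, hv2, hvf⟩, hx⟩)
        · exact (hJ1 x).mpr (Or.inl (habs e he ⟨v, hv2, hvr, hvf⟩ x hx))
      have := ih (bw_round wm op) p.1 p.2 hmem' hs' hfr' habs' hndp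
      show (∀ x, x ∈ bw_loop wm t (bw_round wm op) ↔ x ∈ bwAlt_loop (bwAlt_adj wm) (t+1) r fr) ∧ _
      rw [show bwAlt_loop (bwAlt_adj wm) (t+1) r fr
          = bwAlt_loop (bwAlt_adj wm) t p.1 p.2 from by
        simp only [bwAlt_loop]; rw [if_neg hfre]]
      exact this

-- ===== VERDICT (by name: the statement is the Claim_ definition above) =====
theorem burningTheWood_spec : Claim_equal_burningTheWood := by
  intro n wmap start k _ hpre
  unfold Spec_burningTheWood burningTheWood burningTheWood_alt
  rcases hpre with hk | hedges
  · -- k ≤ 0: zero rounds on both sides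
    rw [show k.toNat = 0 from by omega]
    simp [bw_loop, bwAlt_loop]
  · have hmain := bw_main wmap start hedges k.toNat [start]
      (PySem.Set.ofList [start]) [start]
      (by intro x; rw [PySem.Set.mem_ofList])
      (by simp)
      (by intro x hx; rw [PySem.Set.mem_ofList]; exact hx)
      (by
        rintro e he ⟨v, _, hvr, hvf⟩ x hx
        rw [PySem.Set.mem_ofList] at hvr
        exact absurd hvr hvf)
      (PySem.Set.nodup_ofList [start])
    obtain ⟨hm, hnd⟩ := hmain
    apply PySem.List.sorted_eq_sorted_of_perm _ _ _ (fun a b h => h)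
    rw [List.perm_ext_iff_of_nodup (PySem.Set.nodup_ofList _) hnd]
    intro a
    rw [PySem.Set.mem_ofList]
    exact hm a
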